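-- pv_equiv track=rewrite | github.com/grantwwu/jsonapi_flex | utilities.py | split_str_on_comma
-- ===== SOURCE A (Python) =====
-- def split_str_on_comma(str):
--     """
--     This function will split str using comma except
--     there is a '\' before it. Meanwhile, '\' if used as
--     escaped symbol will be removed.
--     example:
--     Raw string "hello,world\,hello\\,again\\\,world" will be
--     ["hello", "world,hello\", "again\,world"].
--     In python format, the str will actually be
--     'hello,world\\,hello\\\\,again\\\\\\,world',
--     and the list will actually be
--     ['hello', 'world,hello\\', 'again\\,world'].
--     :param str: input str to parse
--     :return: the result list
--     """
--     length_str = len(str)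
--     # To check if the current character is escaped.
--     is_escaped = False
--     result = []
--     sub_str = ""
--     for i in range(length_str):
--         # If this comma is not escaped,
--         # separate with this comma.
--         if str[i] == "," and not is_escaped:
--             # Check if it is an empty string.
--             if sub_str:
--                 result.append(sub_str)
--             sub_str = ""
--         # If this current character is escaped,
--         # it will have no use, and since it is added
--         # to sub_str when it is considered as escaped,
--         # just continue.
--         elif is_escaped:
--             is_escaped = False
--             continue
--         else:
--             # If current is escape symbol, and itself is
--             # not escaped, put the is_escaped flag to True,
--             # and remove this symbol by jumping to next
--             # character.
--             if str[i] == "\\":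
--                 is_escaped = True
--                 # Check the string boundary.
--                 if i < length_str - 1:
--                     i = i + 1
--             sub_str = sub_str + str[i]
--     if sub_str:
--         result.append(sub_str)
--     return result
-- ===== SOURCE B (Python) =====
-- def split_str_on_comma(str):
--     # Pair-consuming scan: a backslash consumes the next character directly
--     # (trailing backslash stands for itself); no escape flag is carried.
--     result = []
--     buf = []
--     it = iter(str)
--     for c in it:
--         if c == ",":
--             if buf:
--                 result.append("".join(buf))
--             buf = []
--         elif c == "\\":
--             buf.append(next(it, "\\"))
--         else:
--             buf.append(c)
--     if buf:
--         result.append("".join(buf))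
--     return result
-- ===== Notes on version B (the rewrite author's own statement) =====
-- stated objective: simpler
-- what changed: Replaced A's indexed loop with an is_escaped flag carried across iterations (plus the in-iteration i=i+1 trick) by a pair-consuming iterator scan: a backslash directly consumes the next character (or stands for itself at the end), so no escape state survives an iteration; pieces are accumulated in a list and joined instead of quadratic string concatenation.
import Mathlib
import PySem

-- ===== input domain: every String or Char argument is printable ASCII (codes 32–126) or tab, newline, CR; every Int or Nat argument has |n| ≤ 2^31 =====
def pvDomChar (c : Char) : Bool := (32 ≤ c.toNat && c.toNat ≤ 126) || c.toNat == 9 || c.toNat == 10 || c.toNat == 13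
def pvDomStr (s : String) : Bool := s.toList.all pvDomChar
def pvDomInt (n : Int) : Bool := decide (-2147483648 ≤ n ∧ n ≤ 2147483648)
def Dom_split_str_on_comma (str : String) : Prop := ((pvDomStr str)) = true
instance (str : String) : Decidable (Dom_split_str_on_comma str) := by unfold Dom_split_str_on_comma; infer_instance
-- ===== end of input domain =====

-- B replaces A's per-character escape-flag state machine with a pair-consuming scan
-- (a backslash consumes the next character directly); objective: simpler.

-- ===== PORT A =====
-- A's for-loop over range(len(str)) with state (is_escaped, result, sub_str);
-- the in-iteration `i = i + 1` is transliterated as reading index j (i or i+1).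
def splitACore (cs : List Char) (n : Nat) (i : Nat) (esc : Bool)
    (res : List (List Char)) (sub : List Char) : List (List Char) × List Char :=
  if h : i < n then
    let c := cs.getD i ' '
    if c = ',' ∧ esc = false then
      splitACore cs n (i + 1) esc (if sub.isEmpty then res else res ++ [sub]) []
    else if esc = true then
      splitACore cs n (i + 1) false res sub
    else
      if c = '\\' then
        let j := if i < n - 1 then i + 1 else i
        splitACore cs n (i + 1) true res (sub ++ [cs.getD j ' '])
      else
        splitACore cs n (i + 1) esc res (sub ++ [c])
  else
    (res, sub)
termination_by n - i

def split_str_on_comma (str : String) : List String :=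
  match splitACore str.toList str.toList.length 0 false [] [] with
  | (res, sub) => (if sub.isEmpty then res else res ++ [sub]).map String.ofList

-- ===== PORT B =====
-- B's pair-consuming loop over the character iterator: ',' closes the buffer,
-- '\' consumes the next character (or stands for itself at the end).
def splitBCore (rest : List Char) (buf : List Char) (out : List (List Char)) :
    List (List Char) × List Char :=
  match rest with
  | [] => (out, buf)
  | ',' :: rest' => splitBCore rest' [] (if buf.isEmpty then out else out ++ [buf])
  | '\\' :: rest' =>
    match rest' with
    | [] => splitBCore [] (buf ++ ['\\']) out
    | d :: rest'' => splitBCore rest'' (buf ++ [d]) out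
  | c :: rest' => splitBCore rest' (buf ++ [c]) out

def split_str_on_comma_alt (str : String) : List String :=
  match splitBCore str.toList [] [] with
  | (out, buf) => (if buf.isEmpty then out else out ++ [buf]).map String.ofList

-- ===== PRECONDITION & SPEC =====
def Spec_split_str_on_comma (str : String) (out : List String) : Prop := out = split_str_on_comma_alt str
instance (str : String) (out : List String) : Decidable (Spec_split_str_on_comma str out) := by unfold Spec_split_str_on_comma; infer_instance

-- ===== CLAIM (what is proved, stated in full; the proofs are below) =====
def Claim_equal_split_str_on_comma : Prop := ∀ (str : String), Dom_split_str_on_comma str → Spec_split_str_on_comma str (split_str_on_comma str)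

-- ===== LEMMAS AND PROOFS =====

-- When the escape flag is set, A's iteration just clears it and skips the character.
theorem splitACore_esc (cs : List Char) (n i : Nat) (res : List (List Char))
    (sub : List Char) (h : i < n) :
    splitACore cs n i true res sub = splitACore cs n (i + 1) false res sub := by
  rw [splitACore]
  simp [h]

theorem splitBCore_cons_other (c : Char) (hc : c ≠ ',') (hb : c ≠ '\\')
    (rest buf out) : splitBCore (c :: rest) buf out = splitBCore rest (buf ++ [c]) out := by
  rw [splitBCore.eq_def]
  split <;> simp_all

-- Main invariant: A's loop from index i equals B's loop on the remaining characters.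
theorem splitACore_eq_splitBCore (cs : List Char) (k : Nat) :
    ∀ i res sub, cs.length - i ≤ k → i ≤ cs.length →
      splitACore cs cs.length i false res sub = splitBCore (cs.drop i) sub res := by
  induction k with
  | zero =>
    intro i res sub hk hle
    have heq : i = cs.length := by omega
    rw [splitACore, splitBCore.eq_def]
    simp [heq]
  | succ k ih =>
    intro i res sub hk hle
    rcases Nat.eq_or_lt_of_le hle with heq | hlt
    · rw [splitACore, splitBCore.eq_def]
      simp [heq]
    · have hdrop : cs.drop i = cs[i] :: cs.drop (i + 1) := List.drop_eq_getElem_cons hlt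
      have hgetD : cs.getD i ' ' = cs[i] := List.getD_eq_getElem cs ' ' hlt
      rw [splitACore]
      by_cases hc : cs[i] = ','
      · rw [hdrop, hc, splitBCore]
        simp [hlt, hc]
        exact ih (i + 1) _ _ (by omega) hlt
      · by_cases hb : cs[i] = '\\'
        · by_cases hlast : i < cs.length - 1
          · -- backslash with a following character: A appends cs[i+1] and sets esc,
            -- which is then skipped; B consumes the pair.
            have hlt1 : i + 1 < cs.length := by omega
            have hdrop1 : cs.drop (i + 1) = cs[i + 1] :: cs.drop (i + 2) :=
              List.drop_eq_getElem_cons hlt1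
            rw [hdrop, hb, hdrop1, splitBCore]
            have hgetD1 : cs.getD (i + 1) ' ' = cs[i + 1] := List.getD_eq_getElem cs ' ' hlt1
            simp [hlt, hb, hlast, List.getElem?_eq_getElem hlt1]
            rw [splitACore_esc cs cs.length (i + 1) res _ hlt1]
            exact ih (i + 2) _ _ (by omega) hlt1
          · -- trailing backslash: i = length - 1; A appends '\' and the loop ends.
            have hdropempty : cs.drop (i + 1) = [] := by
              apply List.drop_of_length_le; omega
            rw [hdrop, hb, hdropempty, splitBCore, splitBCore]
            simp [hlt, hb, hlast]
            rw [splitACore]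
            simp [show ¬ (i + 1 < cs.length) by omega]
        · -- ordinary character
          rw [hdrop, splitBCore_cons_other cs[i] hc hb]
          simp [hlt, hgetD, hc, hb]
          exact ih (i + 1) _ _ (by omega) hlt

-- ===== VERDICT (by name: the statement is the Claim_ definition above) =====
theorem split_str_on_comma_spec : Claim_equal_split_str_on_comma := by
  intro str _
  unfold Spec_split_str_on_comma split_str_on_comma split_str_on_comma_alt
  rw [splitACore_eq_splitBCore str.toList str.toList.length 0 [] []
    (by omega) (Nat.zero_le _), List.drop_zero]
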